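-- pv_equiv track=rewrite | github.com/lorenzo2505-font/ITS-Esercizi | ripasso/somma_matrice.py | sum_primary_diagonal
-- ===== SOURCE A (Python) =====
-- def sum_primary_diagonal(mylist: list [list[int]]) -> int:
--
--
--     somma = 0
--
--     x = 0
--
--
--
--     for i in range(len(mylist)):
--
--         if len(mylist[i]) != len(mylist):
--
--             raise Exception("la matrice deve essere di dimensioni n X n")
--
--
--
--         somma += mylist[i][x]
--
--         x += 1
--
--     return somma
-- ===== SOURCE B (Python) =====
-- def sum_primary_diagonal(mylist: list[list[int]]) -> int:
--     if not mylist: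
--         return 0
--     if len(mylist[0]) != len(mylist):
--         raise Exception("la matrice deve essere di dimensioni n X n")
--     return mylist[0][0] + sum_primary_diagonal([row[1:] for row in mylist[1:]])
-- ===== Notes on version B (the rewrite author's own statement) =====
-- stated objective: alternative
-- what changed: A's single indexed loop over range(len(mylist)) with a separate column counter x is replaced by structural recursion on the matrix: strip the first row and the first column (row[1:] of each remaining row) and recurse on the (n-1)x(n-1) submatrix, adding mylist[0][0] at each level; no indices are used at all.
import Mathlib
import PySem

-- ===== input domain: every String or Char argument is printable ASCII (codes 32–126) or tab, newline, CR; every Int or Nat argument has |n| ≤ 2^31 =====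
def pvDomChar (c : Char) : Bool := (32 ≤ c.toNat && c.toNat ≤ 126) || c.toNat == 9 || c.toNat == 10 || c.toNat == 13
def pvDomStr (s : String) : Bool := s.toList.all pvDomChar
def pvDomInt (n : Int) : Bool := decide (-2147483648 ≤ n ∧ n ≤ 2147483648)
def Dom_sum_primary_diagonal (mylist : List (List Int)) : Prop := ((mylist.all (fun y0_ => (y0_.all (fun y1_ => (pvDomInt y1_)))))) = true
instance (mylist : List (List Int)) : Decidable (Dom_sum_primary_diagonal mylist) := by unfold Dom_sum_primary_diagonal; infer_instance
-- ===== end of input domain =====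

-- B replaces A's single indexed loop (range + column counter x) by structural
-- recursion on the matrix: add mylist[0][0] and recurse on the submatrix with
-- the first row and first column stripped; alternative decomposition, same values.
-- Pre_ excludes non-square inputs, on which both A and B raise the same Exception.


-- ===== PORT A =====
-- A's loop carries (somma, x); the raise is modelled as `none` (excluded by Pre_).
def sum_primary_diagonal (mylist : List (List Int)) : Int :=
  let res := (PySem.List.pyRange 0 mylist.length 1).foldl
    (fun st i =>
      match st with
      | none => none
      | some (somma, x) =>
        let row := PySem.List.pyGetD mylist i []
        if (row.length : Int) ≠ (mylist.length : Int) then none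
        else some (somma + PySem.List.pyGetD row x 0, x + 1))
    (some ((0 : Int), (0 : Int)))
  match res with
  | some (somma, _) => somma
  | none => 0  -- unreachable under Pre_: Python raises here

-- ===== PORT B =====
-- Structural recursion: peel the first row, strip the first column of the rest.
def sum_primary_diagonal_alt (mylist : List (List Int)) : Int :=
  match mylist with
  | [] => 0
  | r :: rest =>
    if (r.length : Int) ≠ ((r :: rest).length : Int) then 0  -- unreachable under Pre_: Python raises here
    else PySem.List.pyGetD r 0 0 +
      sum_primary_diagonal_alt (rest.map (fun row => PySem.List.slice row (some 1) none))
termination_by mylist.length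
decreasing_by simp

-- ===== PRECONDITION & SPEC =====
-- Pre_ admits exactly the square matrices: on any other input both A and B raise
-- Exception("la matrice deve essere di dimensioni n X n").
def Pre_sum_primary_diagonal (mylist : List (List Int)) : Prop :=
  ∀ row ∈ mylist, row.length = mylist.length
instance (mylist : List (List Int)) : Decidable (Pre_sum_primary_diagonal mylist) := by unfold Pre_sum_primary_diagonal; infer_instance

def pvWitness_sum_primary_diagonal : List (List Int) := [[1, 2], [3, 4]]

def Spec_sum_primary_diagonal (mylist : List (List Int)) (out : Int) : Prop := out = sum_primary_diagonal_alt mylist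
instance (mylist : List (List Int)) (out : Int) : Decidable (Spec_sum_primary_diagonal mylist out) := by unfold Spec_sum_primary_diagonal; infer_instance

-- ===== CLAIM (what is proved, stated in full; the proofs are below) =====
def Claim_equal_sum_primary_diagonal : Prop := ∀ (mylist : List (List Int)), Dom_sum_primary_diagonal mylist → Pre_sum_primary_diagonal mylist → Spec_sum_primary_diagonal mylist (sum_primary_diagonal mylist)

-- ===== LEMMAS AND PROOFS =====

-- Common characterisation both ports are proved equal to: the sum of M[k][k].
def pvDiagSum (M : List (List Int)) : Int :=
  ((List.range M.length).map (fun k => (M.getD k []).getD k 0)).sum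

theorem foldl_add_sum (l : List Int) (g : Int → Int) (s : Int) :
    l.foldl (fun acc i => acc + g i) s = s + (l.map g).sum := by
  induction l generalizing s with
  | nil => simp
  | cons a t ih => simp [ih, add_assoc]

-- Under Pre_, A's loop from index a never hits the raise branch, keeps x equal
-- to the loop index, and accumulates the diagonal entries.
theorem loop_agree (mylist : List (List Int))
    (h : ∀ row ∈ mylist, row.length = mylist.length)
    (a s : Int) (ha : 0 ≤ a) (hle : a ≤ (mylist.length : Int)) :
    (PySem.List.pyRange a (mylist.length : Int) 1).foldl
      (fun st i =>
        match st with
        | none => none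
        | some (somma, x) =>
          let row := PySem.List.pyGetD mylist i []
          if (row.length : Int) ≠ (mylist.length : Int) then none
          else some (somma + PySem.List.pyGetD row x 0, x + 1))
      (some (s, a))
    = some ((PySem.List.pyRange a (mylist.length : Int) 1).foldl
        (fun acc i => acc + PySem.List.pyGetD (PySem.List.pyGetD mylist i []) i 0) s,
        (mylist.length : Int)) := by
  generalize hgen : ((mylist.length : Int) - a).toNat = k
  induction k generalizing a s with
  | zero =>
    have hae : a = (mylist.length : Int) := by omega
    subst hae
    rw [PySem.List.pyRange_one_eq_nil le_rfl]
    simp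
  | succ k ih =>
    have hlt : a < (mylist.length : Int) := by omega
    rw [PySem.List.pyRange_one_cons hlt]
    simp only [List.foldl_cons]
    have hlen : (PySem.List.pyGetD mylist a []).length = mylist.length := by
      apply h
      rw [PySem.List.pyGetD_eq_getElem mylist ([] : List Int) ha hlt]
      exact List.getElem_mem _
    rw [if_neg (by simp [hlen])]
    exact ih (a + 1) _ (by omega) (by omega) (by omega)

theorem a_eq_diag (mylist : List (List Int))
    (h : ∀ row ∈ mylist, row.length = mylist.length) :
    sum_primary_diagonal mylist = pvDiagSum mylist := by
  unfold sum_primary_diagonal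
  rw [loop_agree mylist h 0 0 le_rfl (by positivity)]
  simp only [foldl_add_sum, zero_add, pvDiagSum]
  rw [PySem.List.pyRange_zero_natCast]
  rw [List.map_map]
  apply congrArg
  apply List.map_congr_left
  intro k hk
  have hk' : k < mylist.length := List.mem_range.mp hk
  simp only [Function.comp]
  rw [PySem.List.pyGetD_natCast]
  have hrow : mylist.getD k [] = mylist[k] := List.getD_eq_getElem mylist [] hk'
  rw [hrow, PySem.List.pyGetD_natCast, List.getD_eq_getElem _ _ hk']


theorem getD_tail {α : Type} (l : List α) (k : Nat) (d : α) :
    l.tail.getD k d = l.getD (k + 1) d := by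
  cases l <;> simp [List.getD]

theorem b_eq_diag : ∀ (n : Nat) (M : List (List Int)), M.length = n →
    (∀ row ∈ M, row.length = n) → sum_primary_diagonal_alt M = pvDiagSum M := by
  intro n
  induction n with
  | zero =>
    intro M hlen _
    have : M = [] := List.eq_nil_of_length_eq_zero hlen
    subst this
    rw [sum_primary_diagonal_alt]
    rfl
  | succ n ih =>
    intro M hlen hsq
    match M with
    | r :: rest =>
      have hr : r.length = n + 1 := hsq r (List.mem_cons_self)
      have hrestlen : rest.length = n := by simpa using hlen
      rw [sum_primary_diagonal_alt]
      rw [if_neg (by simp [hr, hlen])]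
      simp only [PySem.List.slice_from_one]
      have hsq' : ∀ row ∈ rest.map List.tail, row.length = n := by
        intro row hrow
        obtain ⟨orig, ho, rfl⟩ := List.mem_map.mp hrow
        have := hsq orig (List.mem_cons_of_mem r ho)
        simp [this]
      rw [ih (rest.map List.tail) (by simp [hrestlen]) hsq']
      -- now: r[0] + diag of stripped submatrix = diag of M
      unfold pvDiagSum
      simp only [List.length_map, hrestlen, hlen]
      rw [List.range_succ_eq_map]
      simp only [List.map_cons, List.sum_cons, List.map_map]
      have h0 : PySem.List.pyGetD r 0 0 = r.getD 0 0 := by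
        simpa using PySem.List.pyGetD_natCast r 0 0
      rw [h0]
      simp only [List.getD_cons_zero]
      apply congrArg (fun t => r.getD 0 0 + t)
      apply congrArg
      apply List.map_congr_left
      intro k hk
      have hk' : k < rest.length := by
        rw [hrestlen]; exact List.mem_range.mp hk
      simp only [Function.comp, Nat.succ_eq_add_one, List.getD_cons_succ]
      rw [List.getD_eq_getElem (List.map List.tail rest) [] (by simpa using hk'),
        List.getElem_map, getD_tail, List.getD_eq_getElem rest [] hk']
    | [] => simp at hlen

-- ===== VERDICT (by name: the statement is the Claim_ definition above) =====
theorem sum_primary_diagonal_spec : Claim_equal_sum_primary_diagonal := by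
  intro mylist _ hpre
  unfold Spec_sum_primary_diagonal
  rw [a_eq_diag mylist hpre, b_eq_diag mylist.length mylist rfl hpre]
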